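-- pv_equiv track=rewrite | github.com/safrasmim/stocks-analysis-final | backend/scripts/build_training_from_ohlc.py | assign_event_date
-- ===== SOURCE A (Python) =====
-- def assign_event_date(pub_date, pub_hour, trading_days_set, trading_days_sorted):
--     """After-hours (>=12 UTC = 15:00 AST) -> assign to next trading day."""
--     if pub_hour >= 12:
--         for td in trading_days_sorted:
--             if td > pub_date:
--                 return td
--     if pub_date in trading_days_set:
--         return pub_date
--     for td in trading_days_sorted:
--         if td > pub_date:
--             return td
--     return pub_date
-- ===== SOURCE B (Python) =====
-- def assign_event_date(pub_date, pub_hour, trading_days_set, trading_days_sorted):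
--     """After-hours (>=12 UTC = 15:00 AST) -> assign to next trading day.
--     Binary search (hand-rolled bisect_right) on the sorted trading days for the
--     first day strictly after pub_date, computed once."""
--     lo, hi = 0, len(trading_days_sorted)
--     while lo < hi:
--         mid = (lo + hi) // 2
--         if trading_days_sorted[mid] <= pub_date:
--             lo = mid + 1
--         else:
--             hi = mid
--     nxt = trading_days_sorted[lo] if lo < len(trading_days_sorted) else None
--     if nxt is not None and pub_hour >= 12:
--         return nxt
--     if pub_date in trading_days_set:
--         return pub_date
--     return nxt if nxt is not None else pub_date
-- ===== Notes on version B (the rewrite author's own statement) =====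
-- stated objective: alternative
-- what changed: Replaces A's two linear scans of trading_days_sorted with one hand-rolled bisect_right binary search that locates the first trading day after pub_date once; same measured cost at tested sizes.
-- outside the precondition, e.g. on assign_event_date('b', 0, set(), ['z', 'a', 'c']): A returns 'z', B returns 'c'
import Mathlib
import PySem

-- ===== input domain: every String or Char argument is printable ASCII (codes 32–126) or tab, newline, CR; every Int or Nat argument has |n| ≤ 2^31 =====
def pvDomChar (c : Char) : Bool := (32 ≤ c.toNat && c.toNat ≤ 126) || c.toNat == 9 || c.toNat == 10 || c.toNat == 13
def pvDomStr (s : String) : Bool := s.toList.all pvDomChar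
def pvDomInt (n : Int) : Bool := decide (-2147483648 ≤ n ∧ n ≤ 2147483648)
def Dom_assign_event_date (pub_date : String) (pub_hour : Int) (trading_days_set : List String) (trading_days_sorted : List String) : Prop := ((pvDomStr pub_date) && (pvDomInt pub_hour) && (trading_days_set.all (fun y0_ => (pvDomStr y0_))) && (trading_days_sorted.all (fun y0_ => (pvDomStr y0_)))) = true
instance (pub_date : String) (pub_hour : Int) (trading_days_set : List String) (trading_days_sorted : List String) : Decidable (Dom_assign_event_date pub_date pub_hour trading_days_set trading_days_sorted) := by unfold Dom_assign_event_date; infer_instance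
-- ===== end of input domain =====

-- B replaces A's two linear scans with one hand-rolled bisect_right binary search
-- on the sorted trading-day list (objective: alternative; return value only).
-- Python's `s < t` on str is `<` on `s.toList` (code-point lexicographic); ported via
-- PySem.Chars.strLt, exact on the domain.

-- ===== PORT A =====
-- A's two `for td in trading_days_sorted: if td > pub_date: return td` loops are
-- the identical code; ported once as this helper, called at both places.
def pvFindNextA (pub_date : String) : List String → Option String
  | [] => none
  | td :: rest =>
    if PySem.Chars.strLt pub_date.toList td.toList then some td else pvFindNextA pub_date rest

def assign_event_date (pub_date : String) (pub_hour : Int) (trading_days_set : List String) (trading_days_sorted : List String) : String :=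
  -- the code A runs after (or instead of) the after-hours branch
  let tail : String :=
    if trading_days_set.contains pub_date then pub_date
    else
      match pvFindNextA pub_date trading_days_sorted with
      | some td => td
      | none => pub_date
  if pub_hour ≥ 12 then
    match pvFindNextA pub_date trading_days_sorted with
    | some td => td
    | none => tail
  else tail

-- ===== PORT B =====
-- Source B's while-loop bisect_right. `trading_days_sorted[mid]` is always in range
-- (lo ≤ mid < hi ≤ len), so `getD _ ""` is exact there; Python's test
-- `l[mid] <= x` is ported as `¬ (x < l[mid])`, the same test on a total order.
-- fuel = hi - lo is a pure totality device: the range shrinks each iteration, so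
-- with initial fuel hi - lo the 0-fuel branch is only reached when lo ≥ hi.
def pvBisectGo (l : List String) (x : String) : Nat → Nat → Nat → Nat
  | 0, lo, _ => lo
  | fuel + 1, lo, hi =>
    if lo < hi then
      let mid := (lo + hi) / 2
      if PySem.Chars.strLt x.toList (l.getD mid "").toList then pvBisectGo l x fuel lo mid
      else pvBisectGo l x fuel (mid + 1) hi
    else lo

def pvBisectRight (l : List String) (x : String) (lo hi : Nat) : Nat :=
  pvBisectGo l x (hi - lo) lo hi

def assign_event_date_alt (pub_date : String) (pub_hour : Int) (trading_days_set : List String) (trading_days_sorted : List String) : String :=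
  let lo := pvBisectRight trading_days_sorted pub_date 0 trading_days_sorted.length
  let nxt : Option String :=
    if lo < trading_days_sorted.length then some (trading_days_sorted.getD lo "") else none
  if nxt.isSome ∧ pub_hour ≥ 12 then nxt.getD pub_date
  else if trading_days_set.contains pub_date then pub_date
  else nxt.getD pub_date

-- ===== PRECONDITION & SPEC =====
-- Pre_ excludes inputs whose trading_days_sorted list is not actually sorted (violating
-- the parameter's own contract): there A's first-match-in-list-order is accidental and a
-- binary search legitimately returns a different trading day.
def Pre_assign_event_date (pub_date : String) (pub_hour : Int) (trading_days_set : List String) (trading_days_sorted : List String) : Prop :=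
  List.Pairwise (fun a b => a.toList ≤ b.toList) trading_days_sorted
instance (pub_date : String) (pub_hour : Int) (trading_days_set : List String) (trading_days_sorted : List String) : Decidable (Pre_assign_event_date pub_date pub_hour trading_days_set trading_days_sorted) := by unfold Pre_assign_event_date; infer_instance

def pvWitness_assign_event_date : String × Int × List String × List String :=
  ("b", 13, ["b"], ["c"])

def Spec_assign_event_date (pub_date : String) (pub_hour : Int) (trading_days_set : List String) (trading_days_sorted : List String) (out : String) : Prop := out = assign_event_date_alt pub_date pub_hour trading_days_set trading_days_sorted
instance (pub_date : String) (pub_hour : Int) (trading_days_set : List String) (trading_days_sorted : List String) (out : String) : Decidable (Spec_assign_event_date pub_date pub_hour trading_days_set trading_days_sorted out) := by unfold Spec_assign_event_date; infer_instance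

-- ===== CLAIM (what is proved, stated in full; the proofs are below) =====
def Claim_equal_assign_event_date : Prop := ∀ (pub_date : String) (pub_hour : Int) (trading_days_set : List String) (trading_days_sorted : List String), Dom_assign_event_date pub_date pub_hour trading_days_set trading_days_sorted → Pre_assign_event_date pub_date pub_hour trading_days_set trading_days_sorted → Spec_assign_event_date pub_date pub_hour trading_days_set trading_days_sorted (assign_event_date pub_date pub_hour trading_days_set trading_days_sorted)

-- ===== LEMMAS AND PROOFS =====

-- monotone access into a sorted list
lemma pvGetD_mono (l : List String) (hs : List.Pairwise (fun a b => a.toList ≤ b.toList) l)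
    {i j : Nat} (hij : i ≤ j) (hj : j < l.length) :
    (l.getD i "").toList ≤ (l.getD j "").toList := by
  rcases Nat.lt_or_ge i j with h | h
  · rw [l.getD_eq_getElem "" (by omega), l.getD_eq_getElem "" hj]
    exact List.pairwise_iff_getElem.mp hs i j (by omega) hj h
  · have : i = j := by omega
    subst this
    exact le_refl _

-- invariant of the binary search: the result splits the list at the first element > x
lemma pvBisect_inv (l : List String) (x : String)
    (hs : List.Pairwise (fun a b => a.toList ≤ b.toList) l) :
    ∀ (n lo hi : Nat), hi - lo ≤ n → lo ≤ hi → hi ≤ l.length →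
    (∀ i, i < lo → (l.getD i "").toList ≤ x.toList) →
    (∀ i, hi ≤ i → i < l.length → x.toList < (l.getD i "").toList) →
    pvBisectGo l x n lo hi ≤ l.length ∧
    (∀ i, i < pvBisectGo l x n lo hi → (l.getD i "").toList ≤ x.toList) ∧
    (∀ i, pvBisectGo l x n lo hi ≤ i → i < l.length → x.toList < (l.getD i "").toList) := by
  intro n
  induction n with
  | zero =>
    intro lo hi hn hle hlen h3 h4
    simp only [pvBisectGo]
    exact ⟨by omega, h3, fun i hi1 hi2 => h4 i (by omega) hi2⟩
  | succ n ih =>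
    intro lo hi hn hle hlen h3 h4
    by_cases hlt : lo < hi
    · simp only [pvBisectGo, hlt, if_true]
      have hmidlo : lo ≤ (lo + hi) / 2 := by omega
      have hmidhi : (lo + hi) / 2 < hi := by omega
      by_cases hm : x.toList < (l.getD ((lo + hi) / 2) "").toList
      · simp only [PySem.Chars.strLt, hm, decide_true, if_true]
        apply ih lo ((lo + hi) / 2) (by omega) (by omega) (by omega) h3
        intro i hi1 hi2
        exact lt_of_lt_of_le hm (pvGetD_mono l hs hi1 hi2)
      · simp only [PySem.Chars.strLt, hm, decide_false, if_false]
        apply ih ((lo + hi) / 2 + 1) hi (by omega) (by omega) hlen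
        · intro i hi1
          exact le_trans (pvGetD_mono l hs (by omega) (by omega)) (not_lt.mp hm)
        · exact h4
    · simp only [pvBisectGo, hlt, if_false]
      exact ⟨by omega, h3, fun i hi1 hi2 => h4 i (by omega) hi2⟩

-- A's linear scan returns the element at the split index (if any)
lemma pvFindNextA_eq (x : String) :
    ∀ (l : List String) (k : Nat), k ≤ l.length →
    (∀ i, i < k → (l.getD i "").toList ≤ x.toList) →
    (∀ i, k ≤ i → i < l.length → x.toList < (l.getD i "").toList) →
    pvFindNextA x l = if k < l.length then some (l.getD k "") else none := by
  intro l
  induction l with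
  | nil =>
    intro k hk _ _
    simp [pvFindNextA]
  | cons a t iht =>
    intro k hk h1 h2
    cases k with
    | zero =>
      have hx : x.toList < a.toList := by
        have := h2 0 (by omega) (by simp)
        simpa using this
      simp [pvFindNextA, PySem.Chars.strLt, hx]
    | succ k' =>
      have ha : a.toList ≤ x.toList := by simpa using h1 0 (by omega)
      have hna : ¬ x.toList < a.toList := not_lt.mpr ha
      rw [pvFindNextA]
      simp only [PySem.Chars.strLt, hna, decide_false, if_false]
      have := iht k' (by simpa using hk)
        (fun i hi => by simpa using h1 (i + 1) (by omega))
        (fun i hi1 hi2 => by simpa using h2 (i + 1) (by omega) (by simpa using hi2))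
      rw [this]
      simp

-- ===== VERDICT (by name: the statement is the Claim_ definition above) =====
theorem assign_event_date_spec : Claim_equal_assign_event_date := by
  intro pub_date pub_hour tset tsorted _ hpre
  unfold Spec_assign_event_date assign_event_date assign_event_date_alt
  obtain ⟨hk, h1, h2⟩ := pvBisect_inv tsorted pub_date hpre (tsorted.length - 0) 0 tsorted.length
    (by omega) (by omega) (le_refl _) (by intro i h; omega) (by intro i h1 h2; omega)
  rw [show pvBisectGo tsorted pub_date (tsorted.length - 0) 0 tsorted.length
      = pvBisectRight tsorted pub_date 0 tsorted.length from rfl] at hk h1 h2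
  have hfind := pvFindNextA_eq pub_date tsorted (pvBisectRight tsorted pub_date 0 tsorted.length) hk h1 h2
  by_cases hlt : pvBisectRight tsorted pub_date 0 tsorted.length < tsorted.length <;>
    by_cases h12 : pub_hour ≥ 12 <;>
    by_cases hc : tset.contains pub_date <;>
    simp [hfind, hlt, h12, hc]
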